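-- pv_equiv track=rewrite | github.com/Max-Lange/Delay-Propagation | helper_functions.py | create_timesteps
-- ===== SOURCE A (Python) =====
-- def create_timesteps(timestep_size, timeperiod_start, timeperiod_end) -> list[tuple[int, int]]:
--     timesteps = []
--     current_step = (timeperiod_start, 0)
--     while current_step[0] < timeperiod_end:
--         timesteps.append(current_step)
--         next_step = (current_step[0] + (current_step[1] + timestep_size) // 60,
--                     (current_step[1] + timestep_size) % 60)
--         current_step = next_step
--     timesteps.append(current_step)
--
--     return timesteps
-- ===== SOURCE B (Python) =====
-- def create_timesteps(timestep_size, timeperiod_start, timeperiod_end) -> list[tuple[int, int]]: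
--     # Closed form: entry k is minute-count start + k*step; no loop-carried carry state.
--     start = 60 * timeperiod_start
--     end = 60 * timeperiod_end
--     steps = -((start - end) // timestep_size) if timestep_size > 0 else 0
--     if steps < 0:
--         steps = 0
--     return [divmod(start + k * timestep_size, 60) for k in range(steps + 1)]
-- ===== Notes on version B (the rewrite author's own statement) =====
-- stated objective: alternative
-- what changed: B replaces A's while-loop that carries an (hour, minute) pair with a closed form: it computes the number of steps by ceiling division and builds the list as divmod(start_minutes + k*step, 60) over a range, with no loop-carried state.
import Mathlib
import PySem

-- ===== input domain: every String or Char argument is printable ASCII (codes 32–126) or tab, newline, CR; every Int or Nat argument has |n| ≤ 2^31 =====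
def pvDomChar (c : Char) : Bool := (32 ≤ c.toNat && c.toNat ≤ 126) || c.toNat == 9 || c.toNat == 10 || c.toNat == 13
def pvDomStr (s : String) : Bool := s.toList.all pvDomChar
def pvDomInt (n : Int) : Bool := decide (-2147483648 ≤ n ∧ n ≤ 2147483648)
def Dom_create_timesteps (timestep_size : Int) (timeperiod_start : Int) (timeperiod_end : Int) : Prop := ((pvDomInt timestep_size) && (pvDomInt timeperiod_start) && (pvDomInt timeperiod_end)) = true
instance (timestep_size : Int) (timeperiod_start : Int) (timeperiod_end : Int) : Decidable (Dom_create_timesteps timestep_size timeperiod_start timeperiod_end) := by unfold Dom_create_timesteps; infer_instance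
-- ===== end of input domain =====

-- B replaces A's carried (hour,minute) while-loop with a closed-form comprehension
-- (ceiling-division step count, divmod of absolute minutes); same output, similar cost.


-- ===== PORT A =====
-- A's while loop, step for step; fuel only makes the recursion total (within Pre_ the
-- loop exits before the fuel runs out, so the fuel branch is never the result).
def ctsLoopA (fuel : Nat) (timestep_size timeperiod_end : Int) (h m : Int)
    (acc : List (Int × Int)) : List (Int × Int) :=
  match fuel with
  | 0 => acc ++ [(h, m)]
  | fuel + 1 =>
    if h < timeperiod_end then
      ctsLoopA fuel timestep_size timeperiod_end
        (h + PySem.Int.floordiv (m + timestep_size) 60)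
        (PySem.Int.mod (m + timestep_size) 60)
        (acc ++ [(h, m)])
    else acc ++ [(h, m)]

def create_timesteps (timestep_size : Int) (timeperiod_start : Int) (timeperiod_end : Int) : List (Int × Int) :=
  ctsLoopA ((60 * (timeperiod_end - timeperiod_start)).toNat + 1)
    timestep_size timeperiod_end timeperiod_start 0 []

-- ===== PORT B =====
-- Source B: steps by ceiling division, then a comprehension over range(steps+1);
-- range(n) over the nonnegative `steps + 1` is ported as List.range over its toNat.
def create_timesteps_alt (timestep_size : Int) (timeperiod_start : Int) (timeperiod_end : Int) : List (Int × Int) :=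
  let start := 60 * timeperiod_start
  let ende := 60 * timeperiod_end
  let steps0 : Int := if 0 < timestep_size then -(PySem.Int.floordiv (start - ende) timestep_size) else 0
  let steps : Int := if steps0 < 0 then 0 else steps0
  (List.range (steps + 1).toNat).map
    (fun (k : Nat) => (PySem.Int.floordiv (start + (k : Int) * timestep_size) 60,
               PySem.Int.mod (start + (k : Int) * timestep_size) 60))

-- ===== PRECONDITION & SPEC =====
-- A's while loop diverges (Python never returns) when timestep_size ≤ 0 and
-- timeperiod_start < timeperiod_end; Pre_ excludes exactly those inputs.
def Pre_create_timesteps (timestep_size : Int) (timeperiod_start : Int) (timeperiod_end : Int) : Prop :=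
  0 < timestep_size ∨ timeperiod_end ≤ timeperiod_start
instance (timestep_size : Int) (timeperiod_start : Int) (timeperiod_end : Int) : Decidable (Pre_create_timesteps timestep_size timeperiod_start timeperiod_end) := by unfold Pre_create_timesteps; infer_instance

def pvWitness_create_timesteps : Int × Int × Int := (15, 6, 9)

def Spec_create_timesteps (timestep_size : Int) (timeperiod_start : Int) (timeperiod_end : Int) (out : List (Int × Int)) : Prop := out = create_timesteps_alt timestep_size timeperiod_start timeperiod_end
instance (timestep_size : Int) (timeperiod_start : Int) (timeperiod_end : Int) (out : List (Int × Int)) : Decidable (Spec_create_timesteps timestep_size timeperiod_start timeperiod_end out) := by unfold Spec_create_timesteps; infer_instance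

-- ===== CLAIM (what is proved, stated in full; the proofs are below) =====
def Claim_equal_create_timesteps : Prop := ∀ (timestep_size : Int) (timeperiod_start : Int) (timeperiod_end : Int), Dom_create_timesteps timestep_size timeperiod_start timeperiod_end → Pre_create_timesteps timestep_size timeperiod_start timeperiod_end → Spec_create_timesteps timestep_size timeperiod_start timeperiod_end (create_timesteps timestep_size timeperiod_start timeperiod_end)

-- ===== LEMMAS AND PROOFS =====

-- number of loop iterations A performs from absolute minute t: ⌈(E - t)/s⌉
def ctsN (s E t : Int) : Int := -(PySem.Int.floordiv (t - E) s)

lemma fd60 (h m : Int) (h0 : 0 ≤ m) (h1 : m < 60) :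
    PySem.Int.floordiv (60 * h + m) 60 = h ∧ PySem.Int.mod (60 * h + m) 60 = m := by
  rw [PySem.Int.floordiv_eq_ediv_of_pos (by norm_num), PySem.Int.mod_eq_emod_of_pos (by norm_num)]
  omega

lemma range_shift {α : Type} (f g : Nat → α) (n : Nat) (h : ∀ k, f (k + 1) = g k) :
    List.map f (List.range (n + 1)) = f 0 :: List.map g (List.range n) := by
  rw [List.range_succ_eq_map, List.map_cons, List.map_map]
  congr 1
  apply List.map_congr_left
  intro k _
  simpa using h k

lemma ctsLoopA_closed (s E : Int) (hs : 0 < s) :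
    ∀ (fuel : Nat) (t : Int) (acc : List (Int × Int)),
      (ctsN s (60 * E) t).toNat < fuel →
      ctsLoopA fuel s E (PySem.Int.floordiv t 60) (PySem.Int.mod t 60) acc
        = acc ++ (List.range ((ctsN s (60 * E) t).toNat + 1)).map
            (fun (k : Nat) => (PySem.Int.floordiv (t + (k : Int) * s) 60,
                       PySem.Int.mod (t + (k : Int) * s) 60)) := by
  intro fuel
  induction fuel with
  | zero => intro t acc h; omega
  | succ n ih =>
    intro t acc hfuel
    by_cases hc : PySem.Int.floordiv t 60 < E
    · -- loop iterates: t < 60*E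
      have ht : t < E * 60 := (PySem.Int.floordiv_lt_iff_lt_mul (by norm_num)).mp hc
      have hq := (PySem.Int.floordiv_eq_iff_of_pos hs (a := t - 60 * E)).mp rfl
      set q := PySem.Int.floordiv (t - 60 * E) s with hqdef
      have hqneg : q < 0 := by nlinarith [hq.1]
      -- state update equals advancing absolute minutes by s
      have hstate :
          PySem.Int.floordiv t 60 + PySem.Int.floordiv (PySem.Int.mod t 60 + s) 60
            = PySem.Int.floordiv (t + s) 60 ∧
          PySem.Int.mod (PySem.Int.mod t 60 + s) 60 = PySem.Int.mod (t + s) 60 := by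
        rw [PySem.Int.floordiv_eq_ediv_of_pos (a := t) (by norm_num),
            PySem.Int.mod_eq_emod_of_pos (a := t) (by norm_num),
            PySem.Int.floordiv_eq_ediv_of_pos (by norm_num),
            PySem.Int.mod_eq_emod_of_pos (by norm_num),
            PySem.Int.floordiv_eq_ediv_of_pos (by norm_num),
            PySem.Int.mod_eq_emod_of_pos (by norm_num)]
        omega
      have hNnext : PySem.Int.floordiv (t + s - 60 * E) s = q + 1 := by
        apply (PySem.Int.floordiv_eq_iff_of_pos hs).mpr
        constructor <;> nlinarith [hq.1, hq.2]
      have hNt : ctsN s (60 * E) t = -q := by simp [ctsN, hqdef]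
      have hNts : ctsN s (60 * E) (t + s) = -(q + 1) := by simp [ctsN, hNnext]
      simp only [ctsLoopA, if_pos hc]
      rw [hstate.1, hstate.2, ih (t + s) (acc ++ [(PySem.Int.floordiv t 60, PySem.Int.mod t 60)])
            (by rw [hNts]; rw [hNt] at hfuel; omega)]
      have hlen : (ctsN s (60 * E) t).toNat + 1 = ((ctsN s (60 * E) (t + s)).toNat + 1) + 1 := by
        rw [hNt, hNts]; omega
      rw [hlen]
      have hr := range_shift
        (fun (k : Nat) => (PySem.Int.floordiv (t + (k : Int) * s) 60,
                           PySem.Int.mod (t + (k : Int) * s) 60))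
        (fun (k : Nat) => (PySem.Int.floordiv (t + s + (k : Int) * s) 60,
                           PySem.Int.mod (t + s + (k : Int) * s) 60))
        ((ctsN s (60 * E) (t + s)).toNat + 1)
        (by intro k; push_cast; ring_nf)
      rw [hr]
      simp only [Nat.cast_zero, zero_mul, add_zero, List.append_assoc, List.cons_append,
        List.nil_append]
    · -- loop exits: t ≥ 60*E, zero further iterations
      have ht : E * 60 ≤ t := by
        by_contra h
        exact hc ((PySem.Int.floordiv_lt_iff_lt_mul (by norm_num)).mpr (by omega))
      have hq0 : 0 ≤ PySem.Int.floordiv (t - 60 * E) s :=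
        (PySem.Int.le_floordiv_iff_mul_le hs).mpr (by nlinarith)
      have hN0 : (ctsN s (60 * E) t).toNat = 0 := by simp [ctsN]; omega
      simp only [ctsLoopA, if_neg hc, hN0]
      simp

theorem create_timesteps_spec : Claim_equal_create_timesteps := by
  intro ts st en _ hpre
  unfold Spec_create_timesteps create_timesteps create_timesteps_alt
  have h0 := fd60 st 0 (by norm_num) (by norm_num)
  rw [add_zero] at h0
  by_cases hts : 0 < ts
  · -- A runs its loop; close with the closed form at t = 60*st
    have hq1 : 0 ≤ 60 * st - 60 * en → 0 ≤ PySem.Int.floordiv (60 * st - 60 * en) ts :=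
      fun h => (PySem.Int.le_floordiv_iff_mul_le hts).mpr (by nlinarith)
    have hq2 : 60 * st - 60 * en ≤ 0 → 60 * st - 60 * en ≤ PySem.Int.floordiv (60 * st - 60 * en) ts :=
      fun h => (PySem.Int.le_floordiv_iff_mul_le hts).mpr (by nlinarith)
    have hfuel : (ctsN ts (60 * en) (60 * st)).toNat < (60 * (en - st)).toNat + 1 := by
      unfold ctsN
      rcases (by omega : 60 * st - 60 * en ≤ 0 ∨ 0 < 60 * st - 60 * en) with h | h
      · have := hq2 h; omega
      · have := hq1 (by omega); omega
    have key := ctsLoopA_closed ts en hts ((60 * (en - st)).toNat + 1) (60 * st) [] hfuel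
    rw [h0.1, h0.2] at key
    rw [key]
    simp only [if_pos hts, List.nil_append]
    have hsteps :
        ((if -(PySem.Int.floordiv (60 * st - 60 * en) ts) < 0 then 0
          else -(PySem.Int.floordiv (60 * st - 60 * en) ts)) + 1).toNat
          = (ctsN ts (60 * en) (60 * st)).toNat + 1 := by
      unfold ctsN
      rcases (by omega : 60 * st - 60 * en ≤ 0 ∨ 0 < 60 * st - 60 * en) with h | h
      · have := hq2 h; split <;> omega
      · have := hq1 (by omega); split <;> omega
    rw [hsteps]
  · -- ts ≤ 0 and (by Pre_) en ≤ st: both return the single start entry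
    have hle : en ≤ st := hpre.resolve_left hts
    have h60 : (60 * (en - st)).toNat = 0 := by omega
    rw [h60]
    simp only [ctsLoopA, if_neg (by omega : ¬ st < en), if_neg hts, List.nil_append]
    norm_num [h0.1, h0.2]
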